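-- pv_equiv track=rewrite | github.com/HavedAlhadi/Image-Editor-By-Python | Smoothing.py | MeanBlur
-- ===== SOURCE A (Python) =====
-- n=7
--
-- def square_matrix(square):
--     tot_sum = 0
--     # Calculate sum of all the pixels in n * n matrix
--     for i in range(n):
--         for j in range(n):
--             tot_sum += square[i][j]
--
--     return tot_sum // (n*n)     # return the average of the sum of pixels
--
-- def MeanBlur(image):
--     square = []
--     square_row = []
--     blur_row = []
--     blur_img = []
--     n_rows = len(image)
--
--     # number of columns in the given image
--     n_col = len(image[0])
--
--     # rp is row pointer and cp is column pointer
--     rp, cp = 0, 0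
--     while rp <= n_rows - n:
--         while cp <= n_col-n:
--             for i in range(rp, rp + n):
--                 for j in range(cp, cp + n):
--                     # append all the pixels in a row of n * n matrix
--                     square_row.append(image[i][j])
--                 # append the row in the square i.e. n * n matrix
--                 square.append(square_row)
--                 square_row = []
--
--             # calculate the blurred pixel for given n * n matrix
--             blur_row.append(square_matrix(square))
--             square = []
--             # increase the column pointer
--             cp = cp + 1
--         # append the blur_row in blur_image
--         blur_img.append(blur_row)
--         blur_row = []
--         rp = rp + 1 # increase row pointer
--         cp = 0 # start column pointer from 0 again
--
--     return blur_img
-- ===== SOURCE B (Python) =====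
-- n = 7
--
-- def MeanBlur(image):
--     # Integral image (2D prefix sums): each blurred pixel is four table
--     # lookups instead of re-summing a 7x7 window.
--     if len(image) < n:
--         return []
--     cols = len(image[0])
--     P = [[0] * (cols + 1)]          # P[i][j] = sum of image[a][b] for a < i, b < j
--     for row in image:
--         prev = P[-1]
--         cur = [0]
--         for j in range(cols):
--             cur.append(row[j] + prev[j + 1] + cur[j] - prev[j])
--         P.append(cur)
--     return [[(P[r + n][c + n] - P[r][c + n] - P[r + n][c] + P[r][c]) // (n * n)
--              for c in range(cols - n + 1)]
--             for r in range(len(image) - n + 1)]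
-- ===== Notes on version B (the rewrite author's own statement) =====
-- stated objective: faster
-- what changed: Replaces A's per-window re-summation of all 49 pixels (plus materialising each 7x7 sub-matrix) by a 2D prefix-sum (integral image) built once, so every output pixel is four table lookups.
-- outside the precondition, e.g. on MeanBlur([[1, 2], [3], [4, 5], [6, 7], [8, 9], [10, 11], [12, 13]]): A returns [[]], B raises IndexError
import Mathlib
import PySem

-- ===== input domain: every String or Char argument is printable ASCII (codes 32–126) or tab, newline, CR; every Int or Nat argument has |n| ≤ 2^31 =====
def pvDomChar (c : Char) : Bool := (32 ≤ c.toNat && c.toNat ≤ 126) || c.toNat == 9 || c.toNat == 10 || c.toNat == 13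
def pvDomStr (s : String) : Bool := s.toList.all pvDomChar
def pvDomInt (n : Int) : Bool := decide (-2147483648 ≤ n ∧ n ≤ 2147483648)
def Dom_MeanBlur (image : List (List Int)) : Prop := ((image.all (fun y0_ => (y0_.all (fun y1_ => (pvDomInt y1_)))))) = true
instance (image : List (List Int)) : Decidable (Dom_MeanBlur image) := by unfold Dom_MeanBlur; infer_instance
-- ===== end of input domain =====

-- B replaces A's per-window 7x7 re-summation by a 2D prefix-sum (integral image),
-- so each output pixel costs four table lookups (objective: faster).

-- ===== PORT A =====
-- image[i][j]; inside Pre_ every index A actually uses is in range, so the defaults are never hit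
def pvPix (xs : List (List Int)) (i j : Int) : Int :=
  ((PySem.List.pyGet? ((PySem.List.pyGet? xs i).getD []) j).getD 0)

-- square_matrix: the two for-loops accumulating tot_sum, then tot_sum // (n*n)
def pvSquareMatrix (square : List (List Int)) : Int :=
  PySem.Int.floordiv
    ((PySem.List.pyRange 0 7 1).foldl (fun tot i =>
      (PySem.List.pyRange 0 7 1).foldl (fun t j => t + pvPix square i j) tot) 0)
    49

-- the two inner for-loops of MeanBlur building `square` (appends of square_row / rows)
def pvWindow (image : List (List Int)) (rp cp : Int) : List (List Int) :=
  (PySem.List.pyRange rp (rp + 7) 1).foldl (fun sq i =>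
    sq ++ [(PySem.List.pyRange cp (cp + 7) 1).foldl (fun row j => row ++ [pvPix image i j]) []]) []

-- inner while loop: cp from cp0 while cp <= n_col - 7, appending to blur_row
def pvColLoop (image : List (List Int)) (rp cp : Int) : Nat → List Int → List Int
  | 0, blurRow => blurRow
  | Nat.succ f, blurRow =>
      pvColLoop image rp (cp + 1) f (blurRow ++ [pvSquareMatrix (pvWindow image rp cp)])

-- outer while loop: rp from rp0 while rp <= n_rows - 7, appending blur_row to blur_img
def pvRowLoop (image : List (List Int)) (nCol : Int) (rp : Int) : Nat → List (List Int) → List (List Int)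
  | 0, blurImg => blurImg
  | Nat.succ f, blurImg =>
      pvRowLoop image nCol (rp + 1) f (blurImg ++ [pvColLoop image rp 0 (nCol - 7 + 1).toNat []])

def MeanBlur (image : List (List Int)) : List (List Int) :=
  let nRows : Int := image.length
  let nCol : Int := (((PySem.List.pyGet? image 0).getD []).length : Int)  -- len(image[0]); Pre_ excludes the empty image where Python raises
  pvRowLoop image nCol 0 (nRows - 7 + 1).toNat []

-- ===== PORT B =====
-- one row of the integral image: cur = [0]; for j in range(cols): cur.append(row[j]+prev[j+1]+cur[j]-prev[j])
def pvIntRow (prev row : List Int) (cols : Nat) : List Int :=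
  (List.range cols).foldl (fun cur j =>
    cur ++ [row.getD j 0 + prev.getD (j + 1) 0 + cur.getD j 0 - prev.getD j 0]) [0]

def MeanBlur_alt (image : List (List Int)) : List (List Int) :=
  if image.length < 7 then []
  else
    let cols : Nat := ((PySem.List.pyGet? image 0).getD []).length
    let P : List (List Int) :=
      image.foldl (fun P row => P ++ [pvIntRow (P.getLastD []) row cols]) [List.replicate (cols + 1) 0]
    (List.range ((image.length : Int) - 7 + 1).toNat).map (fun r =>
      (List.range ((cols : Int) - 7 + 1).toNat).map (fun c =>
        PySem.Int.floordiv
          ((P.getD (r + 7) []).getD (c + 7) 0 - (P.getD r []).getD (c + 7) 0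
            - (P.getD (r + 7) []).getD c 0 + (P.getD r []).getD c 0) 49))

-- ===== PRECONDITION & SPEC =====
-- Pre_ excludes the empty image, on which A raises IndexError, and images with at least 7 rows in
-- which some row is shorter than the first: there A raises IndexError as soon as a 7x7 window
-- reaches the short row, except when the first row is itself shorter than 7, where A returns rows
-- of empty lists while B's full prefix-sum pass raises (see cites).
def Pre_MeanBlur (image : List (List Int)) : Prop :=
  image ≠ [] ∧ (7 ≤ image.length → ∀ row ∈ image, (image.headD []).length ≤ row.length)
instance (image : List (List Int)) : Decidable (Pre_MeanBlur image) := by unfold Pre_MeanBlur; infer_instance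

def pvWitness_MeanBlur : List (List Int) := [[1]]

def Spec_MeanBlur (image : List (List Int)) (out : List (List Int)) : Prop := out = MeanBlur_alt image
instance (image : List (List Int)) (out : List (List Int)) : Decidable (Spec_MeanBlur image out) := by unfold Spec_MeanBlur; infer_instance

-- ===== CLAIM (what is proved, stated in full; the proofs are below) =====
def Claim_equal_MeanBlur : Prop := ∀ (image : List (List Int)), Dom_MeanBlur image → Pre_MeanBlur image → Spec_MeanBlur image (MeanBlur image)

-- ===== LEMMAS AND PROOFS =====

-- proof-side abbreviations
def pix (image : List (List Int)) (a b : Nat) : Int := (image.getD a []).getD b 0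

-- sum of row[c..c+k)
def wrow0 (row : List Int) (c : Nat) : Nat → Int
  | 0 => 0
  | k + 1 => wrow0 row c k + row.getD (c + k) 0

-- sum of row[0..j)
def rpref0 (row : List Int) : Nat → Int
  | 0 => 0
  | j + 1 => rpref0 row j + row.getD j 0

-- sum of the first i row-prefixes of width j
def pvTsum (image : List (List Int)) (j : Nat) : Nat → Int
  | 0 => 0
  | i + 1 => pvTsum image j i + rpref0 (image.getD i []) j

-- sum of the 7-wide window rows a = r .. r+k-1 starting at column c
def pvWsum (image : List (List Int)) (r c : Nat) : Nat → Int
  | 0 => 0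
  | k + 1 => pvWsum image r c k + wrow0 (image.getD (r + k) []) c 7

def pvWband (image : List (List Int)) (c w r : Nat) : Nat → Int
  | 0 => 0
  | k + 1 => pvWband image c w r k
      + (rpref0 (image.getD (r + k) []) (c + w) - rpref0 (image.getD (r + k) []) c)

-- the ideal rows of the integral image
def pvProws (image : List (List Int)) (cols : Nat) : Nat → List Int
  | 0 => List.replicate (cols + 1) 0
  | i + 1 => pvIntRow (pvProws image cols i) (image.getD i []) cols

-- ==== A-side reshaping ====

lemma pvPix_natCast (xs : List (List Int)) (a b : Nat) :
    pvPix xs (a : Int) (b : Int) = pix xs a b := by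
  simp [pvPix, pix, PySem.List.pyGet?_natCast, List.getD_eq_getElem?_getD]

lemma pyRange_off (a : Int) :
    PySem.List.pyRange a (a + 7) 1 = (List.range 7).map (fun k : Nat => a + (k : Int)) := by
  have h : (a + 7 - a).toNat = 7 := by omega
  rw [PySem.List.pyRange_one, h]

lemma window_eq (image : List (List Int)) (r c : Nat) :
    pvWindow image (r : Int) (c : Int)
      = (List.range 7).map (fun a => (List.range 7).map (fun b => pix image (r + a) (c + b))) := by
  unfold pvWindow
  rw [pyRange_off, pyRange_off]
  simp only [List.foldl_map, PySem.List.foldl_append_singleton_eq_map, List.nil_append]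
  apply List.map_congr_left; intro a _
  apply List.map_congr_left; intro b _
  have h1 : (r : Int) + (a : Int) = ((r + a : Nat) : Int) := by push_cast; ring
  have h2 : (c : Int) + (b : Int) = ((c + b : Nat) : Int) := by push_cast; ring
  rw [h1, h2, pvPix_natCast]

lemma wrow0_eq_sum (row : List Int) (c : Nat) :
    ∀ k, wrow0 row c k = ((List.range k).map (fun b => row.getD (c + b) 0)).sum := by
  intro k
  induction k with
  | zero => simp [wrow0]
  | succ k ih => simp [wrow0, List.range_succ, ih]

lemma pvWsum_eq_sum (image : List (List Int)) (r c : Nat) :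
    ∀ k, pvWsum image r c k
      = ((List.range k).map (fun a => ((List.range 7).map (fun b => pix image (r + a) (c + b))).sum)).sum := by
  intro k
  induction k with
  | zero => simp [pvWsum]
  | succ k ih => simp [pvWsum, List.range_succ, ih, wrow0_eq_sum, pix]

lemma sq_eq (image : List (List Int)) (r c : Nat) :
    pvSquareMatrix ((List.range 7).map (fun a => (List.range 7).map (fun b => pix image (r + a) (c + b))))
      = PySem.Int.floordiv (pvWsum image r c 7) 49 := by
  unfold pvSquareMatrix
  have h7 : (7 : Int) = ((7 : Nat) : Int) := by norm_num
  rw [h7, PySem.List.pyRange_zero_nat]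
  simp only [List.foldl_map, pvPix_natCast]
  rw [PySem.List.foldl_congr_mem (List.range 7) _
      (fun tot i => tot + ((List.range 7).map (fun j => pix image (r + i) (c + j))).sum) 0 ?_]
  · rw [PySem.List.foldl_add, pvWsum_eq_sum]
    congr 1
    simp
  · intro acc i hi
    rw [PySem.List.foldl_congr_mem (List.range 7) _
        (fun t j => t + pix image (r + i) (c + j)) acc ?_]
    · rw [PySem.List.foldl_add]
    · intro t j hj
      simp only
      congr 1
      simp only [pix]
      rw [PySem.List.getD_map_range _ _ _ _ (List.mem_range.mp hi),
          PySem.List.getD_map_range _ _ _ _ (List.mem_range.mp hj)]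

lemma colLoop_eq (image : List (List Int)) (rp : Int) :
    ∀ (fuel : Nat) (cp : Int) (acc : List Int),
      pvColLoop image rp cp fuel acc
        = acc ++ (List.range fuel).map (fun k : Nat => pvSquareMatrix (pvWindow image rp (cp + (k : Int)))) := by
  intro fuel
  induction fuel with
  | zero => intro cp acc; simp [pvColLoop]
  | succ f ih =>
      intro cp acc
      rw [pvColLoop, ih]
      rw [List.range_succ_eq_map]
      simp only [List.map_cons, List.map_map, Nat.cast_zero, add_zero, List.append_assoc,
        List.singleton_append, Function.comp_def]
      have hmap : (List.range f).map (fun k : Nat => pvSquareMatrix (pvWindow image rp (cp + 1 + (k : Int))))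
          = (List.range f).map (fun k : Nat => pvSquareMatrix (pvWindow image rp (cp + ((Nat.succ k : Nat) : Int)))) := by
        apply List.map_congr_left
        intro k _
        have h : cp + 1 + (k : Int) = cp + ((Nat.succ k : Nat) : Int) := by push_cast; ring
        rw [h]
      rw [hmap]

lemma rowLoop_eq (image : List (List Int)) (nCol : Int) :
    ∀ (fuel : Nat) (rp : Int) (acc : List (List Int)),
      pvRowLoop image nCol rp fuel acc
        = acc ++ (List.range fuel).map
            (fun k : Nat => pvColLoop image (rp + (k : Int)) 0 (nCol - 7 + 1).toNat []) := by
  intro fuel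
  induction fuel with
  | zero => intro rp acc; simp [pvRowLoop]
  | succ f ih =>
      intro rp acc
      rw [pvRowLoop, ih]
      rw [List.range_succ_eq_map]
      simp only [List.map_cons, List.map_map, Nat.cast_zero, add_zero, List.append_assoc,
        List.singleton_append, Function.comp_def]
      have hmap : (List.range f).map (fun k : Nat => pvColLoop image (rp + 1 + (k : Int)) 0 (nCol - 7 + 1).toNat [])
          = (List.range f).map (fun k : Nat => pvColLoop image (rp + ((Nat.succ k : Nat) : Int)) 0 (nCol - 7 + 1).toNat []) := by
        apply List.map_congr_left
        intro k _
        have h : rp + 1 + (k : Int) = rp + ((Nat.succ k : Nat) : Int) := by push_cast; ring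
        rw [h]
      rw [hmap]

-- ==== B-side: the integral image computes prefix sums ====

lemma intRow_succ (prev row : List Int) (k : Nat) :
    pvIntRow prev row (k + 1)
      = pvIntRow prev row k
        ++ [row.getD k 0 + prev.getD (k + 1) 0 + (pvIntRow prev row k).getD k 0 - prev.getD k 0] := by
  simp [pvIntRow, List.range_succ]

lemma intRow_len (prev row : List Int) :
    ∀ cols, (pvIntRow prev row cols).length = cols + 1 := by
  intro cols
  induction cols with
  | zero => simp [pvIntRow]
  | succ k ih => simp [intRow_succ, ih]

lemma intRow_getD (prev row : List Int) (h0 : prev.getD 0 0 = 0) :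
    ∀ cols j, j ≤ cols →
      (pvIntRow prev row cols).getD j 0 = prev.getD j 0 + rpref0 row j := by
  intro cols
  induction cols with
  | zero =>
      intro j hj
      have : j = 0 := by omega
      subst this
      simp only [pvIntRow, List.range_zero, List.foldl_nil, rpref0, add_zero]
      rw [h0]
      rfl
  | succ k ih =>
      intro j hj
      rw [intRow_succ]
      by_cases hjk : j ≤ k
      · rw [List.getD_append _ _ _ j (by rw [intRow_len]; omega), ih j hjk]
      · have hj1 : j = k + 1 := by omega
        subst hj1
        have hl := intRow_len prev row k
        rw [List.getD_eq_getElem?_getD, List.getElem?_append_right (by omega), hl,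
          Nat.sub_self]
        simp only [List.getElem?_cons_zero, Option.getD_some]
        rw [ih k (le_refl k)]
        simp only [rpref0]
        ring

lemma pvTsum_zero (image : List (List Int)) : ∀ i, pvTsum image 0 i = 0 := by
  intro i
  induction i with
  | zero => rfl
  | succ i ih => simp [pvTsum, rpref0, ih]

lemma prows_getD (image : List (List Int)) (cols : Nat) :
    ∀ i j, j ≤ cols → (pvProws image cols i).getD j 0 = pvTsum image j i := by
  intro i
  induction i with
  | zero =>
      intro j hj
      simp only [pvProws, pvTsum]
      exact List.getD_replicate _ (by omega)
  | succ i ih =>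
      intro j hj
      have h0 : (pvProws image cols i).getD 0 0 = 0 := by
        rw [ih 0 (by omega), pvTsum_zero]
      simp only [pvProws]
      rw [intRow_getD _ _ h0 cols j hj, ih j hj]
      simp [pvTsum]

lemma pvProws_append (l : List (List Int)) (x : List Int) (cols : Nat) :
    ∀ i, i ≤ l.length → pvProws (l ++ [x]) cols i = pvProws l cols i := by
  intro i
  induction i with
  | zero => intro _; rfl
  | succ i ih =>
      intro h
      simp only [pvProws]
      rw [ih (by omega), List.getD_append _ _ _ i (by omega)]

lemma pbuild_eq (cols : Nat) :
    ∀ (l : List (List Int)),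
      l.foldl (fun P row => P ++ [pvIntRow (P.getLastD []) row cols]) [List.replicate (cols + 1) 0]
        = (List.range (l.length + 1)).map (pvProws l cols) := by
  intro l
  induction l using List.reverseRecOn with
  | nil => simp [List.range_one, pvProws]
  | append_singleton l x ih =>
      rw [List.foldl_append, ih]
      simp only [List.foldl_cons, List.foldl_nil]
      have hlast : ((List.range (l.length + 1)).map (pvProws l cols)).getLastD [] = pvProws l cols l.length := by
        rw [List.range_succ, List.map_append]
        exact List.getLastD_concat
      rw [hlast]
      rw [show (l ++ [x]).length + 1 = (l.length + 1) + 1 by simp]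
      rw [List.range_succ (n := l.length + 1), List.map_append]
      congr 1
      · apply List.map_congr_left
        intro i hi
        exact (pvProws_append l x cols i (by have := List.mem_range.mp hi; omega)).symm
      · simp only [pvProws, List.map_cons, List.map_nil]
        rw [pvProws_append l x cols l.length (le_refl _)]
        rw [List.getD_append_right _ _ _ _ (le_refl _)]
        simp

-- ==== the window identity ====

lemma rpref0_band (row : List Int) (c : Nat) :
    ∀ w, rpref0 row (c + w) - rpref0 row c = wrow0 row c w := by
  intro w
  induction w with
  | zero => simp [wrow0]
  | succ w ih =>
      have e : c + (w + 1) = (c + w) + 1 := rfl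
      rw [e]
      simp only [rpref0, wrow0]
      linarith [ih]

lemma tsum_band (image : List (List Int)) (c w r : Nat) :
    ∀ k, (pvTsum image (c + w) (r + k) - pvTsum image c (r + k))
          - (pvTsum image (c + w) r - pvTsum image c r) = pvWband image c w r k := by
  intro k
  induction k with
  | zero => simp [pvWband]
  | succ k ih =>
      have e : r + (k + 1) = (r + k) + 1 := rfl
      rw [e]
      simp only [pvTsum, pvWband]
      linarith [ih]

lemma wband_eq_wsum (image : List (List Int)) (c r : Nat) :
    ∀ k, pvWband image c 7 r k = pvWsum image r c k := by
  intro k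
  induction k with
  | zero => rfl
  | succ k ih =>
      simp only [pvWband, pvWsum, ih, rpref0_band]

lemma window_identity (image : List (List Int)) (r c : Nat) :
    pvTsum image (c + 7) (r + 7) - pvTsum image (c + 7) r
      - pvTsum image c (r + 7) + pvTsum image c r = pvWsum image r c 7 := by
  have h := tsum_band image c 7 r 7
  have h2 := wband_eq_wsum image c r 7
  linarith [h, h2]

lemma main_eq (image : List (List Int)) (h7 : ¬ image.length < 7) :
    MeanBlur image = MeanBlur_alt image := by
  simp only [MeanBlur, MeanBlur_alt, if_neg h7]
  rw [rowLoop_eq, pbuild_eq, List.nil_append]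
  apply List.map_congr_left; intro r hr
  rw [colLoop_eq, List.nil_append]
  apply List.map_congr_left; intro c hc
  have hrm := List.mem_range.mp hr
  have hcm := List.mem_range.mp hc
  have hr' : r + 7 ≤ image.length := by omega
  have hc' : c + 7 ≤ ((PySem.List.pyGet? image 0).getD []).length := by omega
  rw [zero_add, zero_add, window_eq, sq_eq]
  rw [PySem.List.getD_map_range _ _ _ _ (by omega : r + 7 < image.length + 1),
      PySem.List.getD_map_range _ _ _ _ (by omega : r < image.length + 1)]
  rw [prows_getD _ _ _ _ (by omega), prows_getD _ _ _ _ hc',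
      prows_getD _ _ _ _ (by omega), prows_getD _ _ _ _ (by omega)]
  congr 1
  have := window_identity image r c
  linarith [this]

-- ===== VERDICT (by name: the statement is the Claim_ definition above) =====
theorem MeanBlur_spec : Claim_equal_MeanBlur := by
  intro image _ _
  unfold Spec_MeanBlur
  by_cases h7 : image.length < 7
  · have hfuel : ((image.length : Int) - 7 + 1).toNat = 0 := by omega
    simp [MeanBlur, MeanBlur_alt, h7, hfuel, pvRowLoop]
  · exact main_eq image h7
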